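-- pv_equiv track=rewrite | github.com/integritystudio/schema-org-file-system | src/storage/models.py | get_schema_type_from_mime
-- ===== SOURCE A (Python) =====
-- from typing import Optional, List, Dict, Any
--
-- def get_schema_type_from_mime(mime_type: Optional[str]) -> str:
--     """Select appropriate schema.org type based on MIME type."""
--     if not mime_type:
--         return "DigitalDocument"
--
--     mime_lower = mime_type.lower()
--
--     type_mapping = {
--         # Images
--         "image/jpeg": "ImageObject",
--         "image/png": "ImageObject",
--         "image/gif": "ImageObject",
--         "image/svg": "ImageObject",
--         "image/webp": "ImageObject",
--         # Video
--         "video/mp4": "VideoObject",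
--         "video/mpeg": "VideoObject",
--         "video/quicktime": "VideoObject",
--         "video/webm": "VideoObject",
--         # Audio
--         "audio/mpeg": "AudioObject",
--         "audio/wav": "AudioObject",
--         "audio/ogg": "AudioObject",
--         "audio/mp4": "AudioObject",
--         # Documents
--         "application/pdf": "DigitalDocument",
--         "application/msword": "DigitalDocument",
--         "application/vnd.openxmlformats-officedocument.wordprocessingml.document": "DigitalDocument",
--         "text/plain": "DigitalDocument",
--         "text/markdown": "DigitalDocument",
--         "text/html": "WebPage",
--         # Code
--         "application/json": "SoftwareSourceCode",
--         "application/x-python": "SoftwareSourceCode",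
--         "text/x-python": "SoftwareSourceCode",
--         "text/typescript": "SoftwareSourceCode",
--     }
--
--     # Try exact match first
--     if mime_type in type_mapping:
--         return type_mapping[mime_type]
--
--     # Try prefix match
--     for mime_prefix, schema_type in type_mapping.items():
--         if mime_lower.startswith(mime_prefix.split('/')[0] + '/'):
--             return schema_type
--
--     return "DigitalDocument"
-- ===== SOURCE B (Python) =====
-- _TABLE = {
--     "image": {"jpeg": "ImageObject", "png": "ImageObject", "gif": "ImageObject",
--               "svg": "ImageObject", "webp": "ImageObject"},
--     "video": {"mp4": "VideoObject", "mpeg": "VideoObject",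
--               "quicktime": "VideoObject", "webm": "VideoObject"},
--     "audio": {"mpeg": "AudioObject", "wav": "AudioObject",
--               "ogg": "AudioObject", "mp4": "AudioObject"},
--     "application": {"pdf": "DigitalDocument", "msword": "DigitalDocument",
--                     "vnd.openxmlformats-officedocument.wordprocessingml.document": "DigitalDocument",
--                     "json": "SoftwareSourceCode", "x-python": "SoftwareSourceCode"},
--     "text": {"plain": "DigitalDocument", "markdown": "DigitalDocument",
--              "html": "WebPage", "x-python": "SoftwareSourceCode",
--              "typescript": "SoftwareSourceCode"},
-- }
--
-- _CATEGORY = {"image": "ImageObject", "video": "VideoObject", "audio": "AudioObject"}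
--
--
-- def get_schema_type_from_mime(mime_type):
--     """Select appropriate schema.org type based on MIME type."""
--     if not mime_type:
--         return "DigitalDocument"
--     category, sep, subtype = mime_type.partition("/")
--     if not sep:
--         return "DigitalDocument"
--     hit = _TABLE.get(category, {}).get(subtype)
--     if hit is not None:
--         return hit
--     return _CATEGORY.get(category.lower(), "DigitalDocument")
-- ===== Notes on version B (the rewrite author's own statement) =====
-- stated objective: alternative
-- what changed: B splits the MIME type once at its first slash and does two-level dictionary lookups (category -> subtype table, then a 3-entry category fallback map), instead of A's flat 23-key exact lookup plus a fallback scan over all table entries that re-splits every key.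
import Mathlib
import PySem

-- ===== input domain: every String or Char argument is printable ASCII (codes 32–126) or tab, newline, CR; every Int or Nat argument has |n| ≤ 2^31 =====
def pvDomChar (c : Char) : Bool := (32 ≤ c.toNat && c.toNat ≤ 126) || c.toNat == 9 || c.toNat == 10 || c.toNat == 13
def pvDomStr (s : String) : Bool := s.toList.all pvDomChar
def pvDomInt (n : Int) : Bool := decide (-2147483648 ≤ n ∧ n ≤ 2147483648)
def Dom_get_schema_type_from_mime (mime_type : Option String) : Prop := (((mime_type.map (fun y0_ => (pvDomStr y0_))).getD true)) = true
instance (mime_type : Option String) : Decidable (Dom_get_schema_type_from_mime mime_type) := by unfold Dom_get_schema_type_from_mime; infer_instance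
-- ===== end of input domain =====

-- B replaces A's flat 23-key table plus fallback scan by one split of the MIME type at
-- its first slash and two-level dictionary lookups (objective: alternative; no speed claim).

-- ===== PORT A =====
-- the literal type_mapping dict of A
def pvTypeMapping : PySem.Dict String String :=
  PySem.Dict.ofList [
    ("image/jpeg", "ImageObject"),
    ("image/png", "ImageObject"),
    ("image/gif", "ImageObject"),
    ("image/svg", "ImageObject"),
    ("image/webp", "ImageObject"),
    ("video/mp4", "VideoObject"),
    ("video/mpeg", "VideoObject"),
    ("video/quicktime", "VideoObject"),
    ("video/webm", "VideoObject"),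
    ("audio/mpeg", "AudioObject"),
    ("audio/wav", "AudioObject"),
    ("audio/ogg", "AudioObject"),
    ("audio/mp4", "AudioObject"),
    ("application/pdf", "DigitalDocument"),
    ("application/msword", "DigitalDocument"),
    ("application/vnd.openxmlformats-officedocument.wordprocessingml.document", "DigitalDocument"),
    ("text/plain", "DigitalDocument"),
    ("text/markdown", "DigitalDocument"),
    ("text/html", "WebPage"),
    ("application/json", "SoftwareSourceCode"),
    ("application/x-python", "SoftwareSourceCode"),
    ("text/x-python", "SoftwareSourceCode"),
    ("text/typescript", "SoftwareSourceCode")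
  ]

-- the 'for mime_prefix, schema_type in type_mapping.items(): …' loop with its final
-- 'return "DigitalDocument"'; split('/')[0] is ported via split? (sep "/" is nonempty so
-- split? is always 'some', and the result is never empty so index 0 via pyGetD is exact)
def pvPrefixLoop (mime_lower : String) : List (String × String) → String
  | [] => "DigitalDocument"
  | (mime_prefix, schema_type) :: rest =>
    if PySem.Str.startswith mime_lower
        ((PySem.List.pyGetD ((PySem.Str.split? mime_prefix "/").getD []) 0 "") ++ "/") then
      schema_type
    else pvPrefixLoop mime_lower rest

def get_schema_type_from_mime (mime_type : Option String) : String :=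
  match mime_type with
  | none => "DigitalDocument"
  | some s =>
    if s = "" then "DigitalDocument"   -- 'if not mime_type'
    else
      let mime_lower := PySem.Str.lower s
      if pvTypeMapping.contains s then (pvTypeMapping.get? s).getD "DigitalDocument"
      else pvPrefixLoop mime_lower pvTypeMapping.items

-- ===== PORT B =====
-- B's _TABLE: schema types keyed by (top-level category, subtype), a two-level dict
def pvSubTable : PySem.Dict String (PySem.Dict String String) :=
  PySem.Dict.ofList [
    ("image", PySem.Dict.ofList [("jpeg", "ImageObject"), ("png", "ImageObject"), ("gif", "ImageObject"), ("svg", "ImageObject"), ("webp", "ImageObject")]),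
    ("video", PySem.Dict.ofList [("mp4", "VideoObject"), ("mpeg", "VideoObject"), ("quicktime", "VideoObject"), ("webm", "VideoObject")]),
    ("audio", PySem.Dict.ofList [("mpeg", "AudioObject"), ("wav", "AudioObject"), ("ogg", "AudioObject"), ("mp4", "AudioObject")]),
    ("application", PySem.Dict.ofList [("pdf", "DigitalDocument"), ("msword", "DigitalDocument"), ("vnd.openxmlformats-officedocument.wordprocessingml.document", "DigitalDocument"), ("json", "SoftwareSourceCode"), ("x-python", "SoftwareSourceCode")]),
    ("text", PySem.Dict.ofList [("plain", "DigitalDocument"), ("markdown", "DigitalDocument"), ("html", "WebPage"), ("x-python", "SoftwareSourceCode"), ("typescript", "SoftwareSourceCode")])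
  ]

-- B's _CATEGORY fallback map
def pvCategoryMap : PySem.Dict String String :=
  PySem.Dict.ofList [("image", "ImageObject"), ("video", "VideoObject"), ("audio", "AudioObject")]

def get_schema_type_from_mime_alt (mime_type : Option String) : String :=
  match mime_type with
  | none => "DigitalDocument"
  | some s =>
    if s = "" then "DigitalDocument"   -- 'if not mime_type'
    else
      -- str.partition('/') has no PySem primitive; ported by hand, exact:
      -- (s[:i], '/', s[i+1:]) at the first '/' (i = s.find('/')), or sep = '' when i < 0
      let i := PySem.Str.find s "/"
      if i < 0 then "DigitalDocument"   -- 'if not sep'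
      else
        let category := PySem.Str.slice s none (some i)
        let subtype := PySem.Str.slice s (some (i + 1)) none
        -- hit = _TABLE.get(category, {}).get(subtype)
        match (pvSubTable.getD category (PySem.Dict.ofList [])).get? subtype with
        | some hit => hit
        | none => pvCategoryMap.getD (PySem.Str.lower category) "DigitalDocument"

-- ===== PRECONDITION & SPEC =====
def Spec_get_schema_type_from_mime (mime_type : Option String) (out : String) : Prop := out = get_schema_type_from_mime_alt mime_type
instance (mime_type : Option String) (out : String) : Decidable (Spec_get_schema_type_from_mime mime_type out) := by unfold Spec_get_schema_type_from_mime; infer_instance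

-- ===== CLAIM (what is proved, stated in full; the proofs are below) =====
def Claim_equal_get_schema_type_from_mime : Prop := ∀ (mime_type : Option String), Dom_get_schema_type_from_mime mime_type → Spec_get_schema_type_from_mime mime_type (get_schema_type_from_mime mime_type)

-- ===== LEMMAS AND PROOFS =====

-- lowerChar only moves 'A'-'Z', so it maps a character to '/' only from '/'
lemma pv_lowerChar_slash (c : Char) : (PySem.Chars.lowerChar c = '/') ↔ c = '/' := by
  unfold PySem.Chars.lowerChar PySem.Chars.isupper
  split_ifs with h
  · rw [Bool.and_eq_true, decide_eq_true_eq, decide_eq_true_eq] at h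
    have h65 : 65 ≤ c.toNat := by simpa [Char.le_def] using h.1
    have h90 : c.toNat ≤ 90 := by simpa [Char.le_def] using h.2
    constructor
    · intro he
      have h2 : (Char.ofNat (c.toNat + 32)).toNat = 47 := by rw [he]; decide
      rw [Char.toNat_ofNat] at h2
      have hv : (c.toNat + 32).isValidChar := by unfold Nat.isValidChar; omega
      rw [if_pos hv] at h2
      omega
    · intro he
      subst he
      simp at h65
  · exact Iff.rfl

-- ['/'] is a prefix of cs.drop k exactly when cs[k] is '/'
lemma pv_pfx_drop (cs : List Char) (k : Nat) : (['/'] <+: cs.drop k) ↔ cs[k]? = some '/' := by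
  constructor
  · rintro ⟨t, ht⟩
    have h2 := List.getElem?_drop (xs := cs) (i := k) (j := 0)
    rw [← ht] at h2
    simpa using h2.symm
  · intro h
    obtain ⟨hlt, hv⟩ := List.getElem?_eq_some_iff.mp h
    refine ⟨cs.drop (k + 1), ?_⟩
    rw [List.drop_eq_getElem_cons hlt, hv]
    rfl

-- find on a single-character pattern is pinned down by its first occurrence
lemma pv_find_single (cs : List Char) (n : Nat) (hn : cs[n]? = some '/')
    (hmin : ∀ j, j < n → ¬ cs[j]? = some '/') : PySem.Chars.find cs ['/'] = (n : Int) := by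
  have hinf : 0 ≤ PySem.Chars.find cs ['/'] := by
    rw [PySem.Chars.find_nonneg_iff]
    obtain ⟨t, ht⟩ := (pv_pfx_drop cs n).mpr hn
    refine ⟨cs.take n, t, ?_⟩
    rw [List.append_assoc, ht, List.take_append_drop]
  obtain ⟨hpre, hmn⟩ := PySem.Chars.find_spec hinf
  have hm : cs[(PySem.Chars.find cs ['/']).toNat]? = some '/' := (pv_pfx_drop cs _).mp hpre
  have h1 : ¬ n < (PySem.Chars.find cs ['/']).toNat := fun h => hmn n h ((pv_pfx_drop cs n).mpr hn)
  have h2 : ¬ (PySem.Chars.find cs ['/']).toNat < n := fun h => hmin _ h hm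
  omega

-- lowercasing does not move the first '/'
lemma pv_find_lower (cs : List Char) :
    PySem.Chars.find (cs.map PySem.Chars.lowerChar) ['/'] = PySem.Chars.find cs ['/'] := by
  have hpt : ∀ k : Nat, (cs.map PySem.Chars.lowerChar)[k]? = some '/' ↔ cs[k]? = some '/' := by
    intro k
    rw [List.getElem?_map]
    cases h : cs[k]? with
    | none => simp
    | some c =>
      simp only [Option.map_some, Option.some.injEq]
      exact pv_lowerChar_slash c
  by_cases h0 : 0 ≤ PySem.Chars.find cs ['/']
  · obtain ⟨hpre, hmn⟩ := PySem.Chars.find_spec h0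
    have hn : (cs.map PySem.Chars.lowerChar)[(PySem.Chars.find cs ['/']).toNat]? = some '/' :=
      (hpt _).mpr ((pv_pfx_drop cs _).mp hpre)
    have hmin : ∀ j, j < (PySem.Chars.find cs ['/']).toNat →
        ¬ (cs.map PySem.Chars.lowerChar)[j]? = some '/' :=
      fun j hj hjj => hmn j hj ((pv_pfx_drop cs j).mpr ((hpt j).mp hjj))
    rw [pv_find_single _ _ hn hmin]
    omega
  · have hneg : PySem.Chars.find cs ['/'] = -1 := by
      have := PySem.Chars.neg_one_le_find cs ['/']
      omega
    rw [hneg, PySem.Chars.find_eq_neg_one_iff]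
    rw [PySem.Chars.find_eq_neg_one_iff] at hneg
    intro hinfix
    apply hneg
    have hin := (PySem.Chars.isIn_iff_infix _ _).mpr hinfix
    obtain ⟨j, hj⟩ := (PySem.Chars.exists_prefix_drop_iff_isIn _ _).mpr hin
    have hcs : cs[j]? = some '/' := (hpt j).mp ((pv_pfx_drop _ j).mp hj)
    rw [← PySem.Chars.isIn_iff_infix]
    rw [← PySem.Chars.exists_prefix_drop_iff_isIn]
    exact ⟨j, (pv_pfx_drop cs j).mpr hcs⟩

-- Str-level: find of '/' commutes with lower()
lemma pv_find_lower_str (s : String) :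
    PySem.Str.find (PySem.Str.lower s) "/" = PySem.Str.find s "/" := by
  rw [PySem.Str.find_eq, PySem.Str.find_eq, PySem.Str.toList_lower]
  exact pv_find_lower s.toList

-- the category slice commutes with lower()
lemma pv_slice_lower_str (s : String) (h0 : 0 ≤ PySem.Str.find s "/") :
    PySem.Str.slice (PySem.Str.lower s) none (some (PySem.Str.find s "/")) =
      PySem.Str.lower (PySem.Str.slice s none (some (PySem.Str.find s "/"))) := by
  apply String.toList_inj.mp
  rw [PySem.Str.toList_slice, PySem.Str.toList_lower, PySem.Str.toList_lower, PySem.Str.toList_slice]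
  rw [PySem.Chars.slice_eq_listSlice, PySem.Chars.slice_eq_listSlice]
  rw [PySem.List.slice_to _ h0, PySem.List.slice_to _ h0]
  show (s.toList.map PySem.Chars.lowerChar).take _ = (s.toList.take _).map PySem.Chars.lowerChar
  rw [List.map_take]

-- a string with a '/' splits as category ++ "/" ++ subtype at the first '/'
lemma pv_reconstruct (s : String) (h0 : 0 ≤ PySem.Str.find s "/") :
    s = PySem.Str.slice s none (some (PySem.Str.find s "/")) ++ "/" ++
        PySem.Str.slice s (some (PySem.Str.find s "/" + 1)) none := by
  apply String.toList_inj.mp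
  rw [String.toList_append, String.toList_append, PySem.Str.toList_slice, PySem.Str.toList_slice]
  rw [PySem.Chars.slice_eq_listSlice, PySem.Chars.slice_eq_listSlice]
  rw [PySem.Str.find_eq] at h0 ⊢
  rw [PySem.List.slice_to _ h0, PySem.List.slice_from _ (by omega)]
  obtain ⟨hpre, _⟩ := PySem.Chars.find_spec (by simpa using h0)
  have hn : s.toList[(PySem.Chars.find s.toList ("/").toList).toNat]? = some '/' :=
    (pv_pfx_drop _ _).mp hpre
  obtain ⟨hlt, hv⟩ := List.getElem?_eq_some_iff.mp hn
  have htn : (PySem.Chars.find s.toList ("/").toList + 1).toNat =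
      (PySem.Chars.find s.toList ("/").toList).toNat + 1 := by omega
  rw [htn]
  conv_lhs => rw [← List.take_append_drop (PySem.Chars.find s.toList ("/").toList).toNat s.toList]
  rw [List.drop_eq_getElem_cons hlt, hv, List.append_assoc]
  rfl

-- the category slice contains no '/'
lemma pv_cat_no_slash (s : String) (h0 : 0 ≤ PySem.Str.find s "/") :
    ('/' : Char) ∉ (PySem.Str.slice s none (some (PySem.Str.find s "/"))).toList := by
  rw [PySem.Str.toList_slice, PySem.Chars.slice_eq_listSlice]
  rw [PySem.Str.find_eq] at h0 ⊢
  rw [PySem.List.slice_to _ h0]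
  intro hmem
  obtain ⟨j, hj, hv⟩ := List.mem_iff_getElem.mp hmem
  obtain ⟨_, hmn⟩ := PySem.Chars.find_spec (by simpa using h0)
  have hjn : j < (PySem.Chars.find s.toList ("/").toList).toNat := by
    have := hj
    simp only [List.length_take] at this
    omega
  apply hmn j hjn
  apply (pv_pfx_drop _ j).mpr
  rw [← List.getElem?_take_of_lt hjn]
  rw [List.getElem?_eq_some_iff]
  exact ⟨hj, hv⟩

-- two category/subtype decompositions of the same string coincide when the categories
-- hold no '/'
lemma pv_key_cond (kc ku c u : String) (hkc : ('/' : Char) ∉ kc.toList)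
    (hc : ('/' : Char) ∉ c.toList) :
    (kc ++ "/" ++ ku = c ++ "/" ++ u) ↔ (kc = c ∧ ku = u) := by
  constructor
  · intro h
    have hfind : ∀ (a b : List Char), ('/' : Char) ∉ a →
        PySem.Chars.find (a ++ '/' :: b) ['/'] = (a.length : Int) := by
      intro a b ha
      apply pv_find_single
      · rw [List.getElem?_append_right (le_refl a.length)]
        simp
      · intro j hj
        rw [List.getElem?_append_left hj]
        intro hsome
        obtain ⟨_, hv⟩ := List.getElem?_eq_some_iff.mp hsome
        exact ha (hv ▸ List.getElem_mem _)
    have hl := congrArg String.toList h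
    simp only [String.toList_append] at hl
    have hl' : kc.toList ++ '/' :: ku.toList = c.toList ++ '/' :: u.toList := by
      simpa using hl
    have hlen : kc.toList.length = c.toList.length := by
      have h1 := hfind kc.toList ku.toList hkc
      have h2 := hfind c.toList u.toList hc
      rw [hl'] at h1
      rw [h1] at h2
      exact_mod_cast h2
    obtain ⟨hkc_eq, htail⟩ := List.append_inj hl' hlen
    refine ⟨String.toList_inj.mp hkc_eq, String.toList_inj.mp ?_⟩
    injection htail
  · rintro ⟨h1, h2⟩
    rw [h1, h2]

-- when s has no '/', A's exact table lookup misses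
lemma pv_exact_none (s : String) (h0 : PySem.Str.find s "/" < 0) :
    pvTypeMapping.get? s = none := by
  have hk1 : ("image/jpeg" == s) = false := by
    rw [beq_eq_false_iff_ne]
    intro he
    rw [← he] at h0
    exact absurd h0 (by decide)
  have hk2 : ("image/png" == s) = false := by
    rw [beq_eq_false_iff_ne]
    intro he
    rw [← he] at h0
    exact absurd h0 (by decide)
  have hk3 : ("image/gif" == s) = false := by
    rw [beq_eq_false_iff_ne]
    intro he
    rw [← he] at h0
    exact absurd h0 (by decide)
  have hk4 : ("image/svg" == s) = false := by
    rw [beq_eq_false_iff_ne]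
    intro he
    rw [← he] at h0
    exact absurd h0 (by decide)
  have hk5 : ("image/webp" == s) = false := by
    rw [beq_eq_false_iff_ne]
    intro he
    rw [← he] at h0
    exact absurd h0 (by decide)
  have hk6 : ("video/mp4" == s) = false := by
    rw [beq_eq_false_iff_ne]
    intro he
    rw [← he] at h0
    exact absurd h0 (by decide)
  have hk7 : ("video/mpeg" == s) = false := by
    rw [beq_eq_false_iff_ne]
    intro he
    rw [← he] at h0
    exact absurd h0 (by decide)
  have hk8 : ("video/quicktime" == s) = false := by
    rw [beq_eq_false_iff_ne]
    intro he
    rw [← he] at h0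
    exact absurd h0 (by decide)
  have hk9 : ("video/webm" == s) = false := by
    rw [beq_eq_false_iff_ne]
    intro he
    rw [← he] at h0
    exact absurd h0 (by decide)
  have hk10 : ("audio/mpeg" == s) = false := by
    rw [beq_eq_false_iff_ne]
    intro he
    rw [← he] at h0
    exact absurd h0 (by decide)
  have hk11 : ("audio/wav" == s) = false := by
    rw [beq_eq_false_iff_ne]
    intro he
    rw [← he] at h0
    exact absurd h0 (by decide)
  have hk12 : ("audio/ogg" == s) = false := by
    rw [beq_eq_false_iff_ne]
    intro he
    rw [← he] at h0
    exact absurd h0 (by decide)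
  have hk13 : ("audio/mp4" == s) = false := by
    rw [beq_eq_false_iff_ne]
    intro he
    rw [← he] at h0
    exact absurd h0 (by decide)
  have hk14 : ("application/pdf" == s) = false := by
    rw [beq_eq_false_iff_ne]
    intro he
    rw [← he] at h0
    exact absurd h0 (by decide)
  have hk15 : ("application/msword" == s) = false := by
    rw [beq_eq_false_iff_ne]
    intro he
    rw [← he] at h0
    exact absurd h0 (by decide)
  have hk16 : ("application/vnd.openxmlformats-officedocument.wordprocessingml.document" == s) = false := by
    rw [beq_eq_false_iff_ne]
    intro he
    rw [← he] at h0
    exact absurd h0 (by decide)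
  have hk17 : ("text/plain" == s) = false := by
    rw [beq_eq_false_iff_ne]
    intro he
    rw [← he] at h0
    exact absurd h0 (by decide)
  have hk18 : ("text/markdown" == s) = false := by
    rw [beq_eq_false_iff_ne]
    intro he
    rw [← he] at h0
    exact absurd h0 (by decide)
  have hk19 : ("text/html" == s) = false := by
    rw [beq_eq_false_iff_ne]
    intro he
    rw [← he] at h0
    exact absurd h0 (by decide)
  have hk20 : ("application/json" == s) = false := by
    rw [beq_eq_false_iff_ne]
    intro he
    rw [← he] at h0
    exact absurd h0 (by decide)
  have hk21 : ("application/x-python" == s) = false := by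
    rw [beq_eq_false_iff_ne]
    intro he
    rw [← he] at h0
    exact absurd h0 (by decide)
  have hk22 : ("text/x-python" == s) = false := by
    rw [beq_eq_false_iff_ne]
    intro he
    rw [← he] at h0
    exact absurd h0 (by decide)
  have hk23 : ("text/typescript" == s) = false := by
    rw [beq_eq_false_iff_ne]
    intro he
    rw [← he] at h0
    exact absurd h0 (by decide)
  have hmk : pvTypeMapping = PySem.Dict.mk [
    ("image/jpeg", "ImageObject"),
    ("image/png", "ImageObject"),
    ("image/gif", "ImageObject"),
    ("image/svg", "ImageObject"),
    ("image/webp", "ImageObject"),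
    ("video/mp4", "VideoObject"),
    ("video/mpeg", "VideoObject"),
    ("video/quicktime", "VideoObject"),
    ("video/webm", "VideoObject"),
    ("audio/mpeg", "AudioObject"),
    ("audio/wav", "AudioObject"),
    ("audio/ogg", "AudioObject"),
    ("audio/mp4", "AudioObject"),
    ("application/pdf", "DigitalDocument"),
    ("application/msword", "DigitalDocument"),
    ("application/vnd.openxmlformats-officedocument.wordprocessingml.document", "DigitalDocument"),
    ("text/plain", "DigitalDocument"),
    ("text/markdown", "DigitalDocument"),
    ("text/html", "WebPage"),
    ("application/json", "SoftwareSourceCode"),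
    ("application/x-python", "SoftwareSourceCode"),
    ("text/x-python", "SoftwareSourceCode"),
    ("text/typescript", "SoftwareSourceCode")
  ] := by decide
  rw [hmk]
  simp only [PySem.Dict.get?_mk_cons, hk1, hk2, hk3, hk4, hk5, hk6, hk7, hk8, hk9, hk10, hk11, hk12, hk13, hk14, hk15, hk16, hk17, hk18, hk19, hk20, hk21, hk22, hk23, Bool.false_eq_true, if_false]
  simp [PySem.Dict.get?]

-- empty literal dicts look up to none
lemma pv_get?_mk_nil {ν : Type} (x : String) :
    (PySem.Dict.mk ([] : List (String × ν))).get? x = none := by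
  simp [PySem.Dict.get?]

-- ofList [] is the empty literal dict
lemma pv_ofList_nil {ν : Type} :
    PySem.Dict.ofList ([] : List (String × ν)) = PySem.Dict.mk [] := rfl

-- the flat table, looked up at category ++ "/" ++ subtype, equals the two-level lookup
lemma pv_tables_eq (c u : String) (hc : ('/' : Char) ∉ c.toList) :
    (PySem.Dict.mk [
    ("image/jpeg", "ImageObject"),
    ("image/png", "ImageObject"),
    ("image/gif", "ImageObject"),
    ("image/svg", "ImageObject"),
    ("image/webp", "ImageObject"),
    ("video/mp4", "VideoObject"),
    ("video/mpeg", "VideoObject"),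
    ("video/quicktime", "VideoObject"),
    ("video/webm", "VideoObject"),
    ("audio/mpeg", "AudioObject"),
    ("audio/wav", "AudioObject"),
    ("audio/ogg", "AudioObject"),
    ("audio/mp4", "AudioObject"),
    ("application/pdf", "DigitalDocument"),
    ("application/msword", "DigitalDocument"),
    ("application/vnd.openxmlformats-officedocument.wordprocessingml.document", "DigitalDocument"),
    ("text/plain", "DigitalDocument"),
    ("text/markdown", "DigitalDocument"),
    ("text/html", "WebPage"),
    ("application/json", "SoftwareSourceCode"),
    ("application/x-python", "SoftwareSourceCode"),
    ("text/x-python", "SoftwareSourceCode"),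
    ("text/typescript", "SoftwareSourceCode")
    ]).get? (c ++ "/" ++ u) =
      ((PySem.Dict.mk [
    ("image", PySem.Dict.mk [("jpeg", "ImageObject"), ("png", "ImageObject"), ("gif", "ImageObject"), ("svg", "ImageObject"), ("webp", "ImageObject")]),
    ("video", PySem.Dict.mk [("mp4", "VideoObject"), ("mpeg", "VideoObject"), ("quicktime", "VideoObject"), ("webm", "VideoObject")]),
    ("audio", PySem.Dict.mk [("mpeg", "AudioObject"), ("wav", "AudioObject"), ("ogg", "AudioObject"), ("mp4", "AudioObject")]),
    ("application", PySem.Dict.mk [("pdf", "DigitalDocument"), ("msword", "DigitalDocument"), ("vnd.openxmlformats-officedocument.wordprocessingml.document", "DigitalDocument"), ("json", "SoftwareSourceCode"), ("x-python", "SoftwareSourceCode")]),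
    ("text", PySem.Dict.mk [("plain", "DigitalDocument"), ("markdown", "DigitalDocument"), ("html", "WebPage"), ("x-python", "SoftwareSourceCode"), ("typescript", "SoftwareSourceCode")])
      ]).getD c (PySem.Dict.ofList [])).get? u := by
  have e1 : (("image/jpeg" : String) = c ++ "/" ++ u) ↔ (("image" : String) = c ∧ ("jpeg" : String) = u) := by
    rw [show ("image/jpeg" : String) = "image" ++ "/" ++ "jpeg" from rfl]
    exact pv_key_cond _ _ _ _ (by decide) hc
  have e2 : (("image/png" : String) = c ++ "/" ++ u) ↔ (("image" : String) = c ∧ ("png" : String) = u) := by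
    rw [show ("image/png" : String) = "image" ++ "/" ++ "png" from rfl]
    exact pv_key_cond _ _ _ _ (by decide) hc
  have e3 : (("image/gif" : String) = c ++ "/" ++ u) ↔ (("image" : String) = c ∧ ("gif" : String) = u) := by
    rw [show ("image/gif" : String) = "image" ++ "/" ++ "gif" from rfl]
    exact pv_key_cond _ _ _ _ (by decide) hc
  have e4 : (("image/svg" : String) = c ++ "/" ++ u) ↔ (("image" : String) = c ∧ ("svg" : String) = u) := by
    rw [show ("image/svg" : String) = "image" ++ "/" ++ "svg" from rfl]
    exact pv_key_cond _ _ _ _ (by decide) hc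
  have e5 : (("image/webp" : String) = c ++ "/" ++ u) ↔ (("image" : String) = c ∧ ("webp" : String) = u) := by
    rw [show ("image/webp" : String) = "image" ++ "/" ++ "webp" from rfl]
    exact pv_key_cond _ _ _ _ (by decide) hc
  have e6 : (("video/mp4" : String) = c ++ "/" ++ u) ↔ (("video" : String) = c ∧ ("mp4" : String) = u) := by
    rw [show ("video/mp4" : String) = "video" ++ "/" ++ "mp4" from rfl]
    exact pv_key_cond _ _ _ _ (by decide) hc
  have e7 : (("video/mpeg" : String) = c ++ "/" ++ u) ↔ (("video" : String) = c ∧ ("mpeg" : String) = u) := by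
    rw [show ("video/mpeg" : String) = "video" ++ "/" ++ "mpeg" from rfl]
    exact pv_key_cond _ _ _ _ (by decide) hc
  have e8 : (("video/quicktime" : String) = c ++ "/" ++ u) ↔ (("video" : String) = c ∧ ("quicktime" : String) = u) := by
    rw [show ("video/quicktime" : String) = "video" ++ "/" ++ "quicktime" from rfl]
    exact pv_key_cond _ _ _ _ (by decide) hc
  have e9 : (("video/webm" : String) = c ++ "/" ++ u) ↔ (("video" : String) = c ∧ ("webm" : String) = u) := by
    rw [show ("video/webm" : String) = "video" ++ "/" ++ "webm" from rfl]
    exact pv_key_cond _ _ _ _ (by decide) hc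
  have e10 : (("audio/mpeg" : String) = c ++ "/" ++ u) ↔ (("audio" : String) = c ∧ ("mpeg" : String) = u) := by
    rw [show ("audio/mpeg" : String) = "audio" ++ "/" ++ "mpeg" from rfl]
    exact pv_key_cond _ _ _ _ (by decide) hc
  have e11 : (("audio/wav" : String) = c ++ "/" ++ u) ↔ (("audio" : String) = c ∧ ("wav" : String) = u) := by
    rw [show ("audio/wav" : String) = "audio" ++ "/" ++ "wav" from rfl]
    exact pv_key_cond _ _ _ _ (by decide) hc
  have e12 : (("audio/ogg" : String) = c ++ "/" ++ u) ↔ (("audio" : String) = c ∧ ("ogg" : String) = u) := by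
    rw [show ("audio/ogg" : String) = "audio" ++ "/" ++ "ogg" from rfl]
    exact pv_key_cond _ _ _ _ (by decide) hc
  have e13 : (("audio/mp4" : String) = c ++ "/" ++ u) ↔ (("audio" : String) = c ∧ ("mp4" : String) = u) := by
    rw [show ("audio/mp4" : String) = "audio" ++ "/" ++ "mp4" from rfl]
    exact pv_key_cond _ _ _ _ (by decide) hc
  have e14 : (("application/pdf" : String) = c ++ "/" ++ u) ↔ (("application" : String) = c ∧ ("pdf" : String) = u) := by
    rw [show ("application/pdf" : String) = "application" ++ "/" ++ "pdf" from rfl]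
    exact pv_key_cond _ _ _ _ (by decide) hc
  have e15 : (("application/msword" : String) = c ++ "/" ++ u) ↔ (("application" : String) = c ∧ ("msword" : String) = u) := by
    rw [show ("application/msword" : String) = "application" ++ "/" ++ "msword" from rfl]
    exact pv_key_cond _ _ _ _ (by decide) hc
  have e16 : (("application/vnd.openxmlformats-officedocument.wordprocessingml.document" : String) = c ++ "/" ++ u) ↔ (("application" : String) = c ∧ ("vnd.openxmlformats-officedocument.wordprocessingml.document" : String) = u) := by
    rw [show ("application/vnd.openxmlformats-officedocument.wordprocessingml.document" : String) = "application" ++ "/" ++ "vnd.openxmlformats-officedocument.wordprocessingml.document" from rfl]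
    exact pv_key_cond _ _ _ _ (by decide) hc
  have e17 : (("text/plain" : String) = c ++ "/" ++ u) ↔ (("text" : String) = c ∧ ("plain" : String) = u) := by
    rw [show ("text/plain" : String) = "text" ++ "/" ++ "plain" from rfl]
    exact pv_key_cond _ _ _ _ (by decide) hc
  have e18 : (("text/markdown" : String) = c ++ "/" ++ u) ↔ (("text" : String) = c ∧ ("markdown" : String) = u) := by
    rw [show ("text/markdown" : String) = "text" ++ "/" ++ "markdown" from rfl]
    exact pv_key_cond _ _ _ _ (by decide) hc
  have e19 : (("text/html" : String) = c ++ "/" ++ u) ↔ (("text" : String) = c ∧ ("html" : String) = u) := by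
    rw [show ("text/html" : String) = "text" ++ "/" ++ "html" from rfl]
    exact pv_key_cond _ _ _ _ (by decide) hc
  have e20 : (("application/json" : String) = c ++ "/" ++ u) ↔ (("application" : String) = c ∧ ("json" : String) = u) := by
    rw [show ("application/json" : String) = "application" ++ "/" ++ "json" from rfl]
    exact pv_key_cond _ _ _ _ (by decide) hc
  have e21 : (("application/x-python" : String) = c ++ "/" ++ u) ↔ (("application" : String) = c ∧ ("x-python" : String) = u) := by
    rw [show ("application/x-python" : String) = "application" ++ "/" ++ "x-python" from rfl]
    exact pv_key_cond _ _ _ _ (by decide) hc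
  have e22 : (("text/x-python" : String) = c ++ "/" ++ u) ↔ (("text" : String) = c ∧ ("x-python" : String) = u) := by
    rw [show ("text/x-python" : String) = "text" ++ "/" ++ "x-python" from rfl]
    exact pv_key_cond _ _ _ _ (by decide) hc
  have e23 : (("text/typescript" : String) = c ++ "/" ++ u) ↔ (("text" : String) = c ∧ ("typescript" : String) = u) := by
    rw [show ("text/typescript" : String) = "text" ++ "/" ++ "typescript" from rfl]
    exact pv_key_cond _ _ _ _ (by decide) hc
  simp only [PySem.Dict.get?_mk_cons, PySem.Dict.getD_eq_get?_getD, beq_iff_eq,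
    e1, e2, e3, e4, e5, e6, e7, e8, e9, e10, e11, e12, e13, e14, e15, e16, e17, e18, e19, e20, e21, e22, e23]
  by_cases c1 : ("image" : String) = c
  · subst c1
    simp [PySem.Dict.get?_mk_cons, beq_iff_eq, pv_get?_mk_nil]
  · by_cases c2 : ("video" : String) = c
    · subst c2
      simp [PySem.Dict.get?_mk_cons, beq_iff_eq, pv_get?_mk_nil]
    · by_cases c3 : ("audio" : String) = c
      · subst c3
        simp [PySem.Dict.get?_mk_cons, beq_iff_eq, pv_get?_mk_nil]
      · by_cases c4 : ("application" : String) = c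
        · subst c4
          simp [PySem.Dict.get?_mk_cons, beq_iff_eq, pv_get?_mk_nil]
        · by_cases c5 : ("text" : String) = c
          · subst c5
            simp [PySem.Dict.get?_mk_cons, beq_iff_eq, pv_get?_mk_nil]
          · simp [c1, c2, c3, c4, c5, pv_get?_mk_nil, pv_ofList_nil]

-- A's exact lookup on s agrees with B's nested lookup on (category, subtype)
lemma pv_exact_eq (s : String) (h0 : 0 ≤ PySem.Str.find s "/") :
    pvTypeMapping.get? s =
      (pvSubTable.getD (PySem.Str.slice s none (some (PySem.Str.find s "/")))
          (PySem.Dict.ofList [])).get?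
        (PySem.Str.slice s (some (PySem.Str.find s "/" + 1)) none) := by
  have hs := pv_reconstruct s h0
  have hc := pv_cat_no_slash s h0
  have hmk : pvTypeMapping = PySem.Dict.mk [
    ("image/jpeg", "ImageObject"),
    ("image/png", "ImageObject"),
    ("image/gif", "ImageObject"),
    ("image/svg", "ImageObject"),
    ("image/webp", "ImageObject"),
    ("video/mp4", "VideoObject"),
    ("video/mpeg", "VideoObject"),
    ("video/quicktime", "VideoObject"),
    ("video/webm", "VideoObject"),
    ("audio/mpeg", "AudioObject"),
    ("audio/wav", "AudioObject"),
    ("audio/ogg", "AudioObject"),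
    ("audio/mp4", "AudioObject"),
    ("application/pdf", "DigitalDocument"),
    ("application/msword", "DigitalDocument"),
    ("application/vnd.openxmlformats-officedocument.wordprocessingml.document", "DigitalDocument"),
    ("text/plain", "DigitalDocument"),
    ("text/markdown", "DigitalDocument"),
    ("text/html", "WebPage"),
    ("application/json", "SoftwareSourceCode"),
    ("application/x-python", "SoftwareSourceCode"),
    ("text/x-python", "SoftwareSourceCode"),
    ("text/typescript", "SoftwareSourceCode")
  ] := by decide
  have hsub : pvSubTable = PySem.Dict.mk [
    ("image", PySem.Dict.mk [("jpeg", "ImageObject"), ("png", "ImageObject"), ("gif", "ImageObject"), ("svg", "ImageObject"), ("webp", "ImageObject")]),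
    ("video", PySem.Dict.mk [("mp4", "VideoObject"), ("mpeg", "VideoObject"), ("quicktime", "VideoObject"), ("webm", "VideoObject")]),
    ("audio", PySem.Dict.mk [("mpeg", "AudioObject"), ("wav", "AudioObject"), ("ogg", "AudioObject"), ("mp4", "AudioObject")]),
    ("application", PySem.Dict.mk [("pdf", "DigitalDocument"), ("msword", "DigitalDocument"), ("vnd.openxmlformats-officedocument.wordprocessingml.document", "DigitalDocument"), ("json", "SoftwareSourceCode"), ("x-python", "SoftwareSourceCode")]),
    ("text", PySem.Dict.mk [("plain", "DigitalDocument"), ("markdown", "DigitalDocument"), ("html", "WebPage"), ("x-python", "SoftwareSourceCode"), ("typescript", "SoftwareSourceCode")])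
  ] := by decide
  rw [hmk, hsub]
  conv_lhs => rw [hs]
  exact pv_tables_eq _ _ hc

-- mime_lower.startswith(cat + '/'), for a category string without '/', holds exactly when
-- mime_lower has a '/' and the text before its first '/' is cat.
lemma pv_sw_slash_list (cs cl : List Char) (hc : ('/' : Char) ∉ cl) :
    PySem.Chars.startswith cs (cl ++ ['/']) =
      (decide (0 ≤ PySem.Chars.find cs ['/']) &&
       decide (cs.take (PySem.Chars.find cs ['/']).toNat = cl)) := by
  by_cases h0 : 0 ≤ PySem.Chars.find cs ['/']
  · obtain ⟨hpre, hmin⟩ := PySem.Chars.find_spec h0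
    simp only [h0, decide_true, Bool.true_and]
    by_cases hsw : PySem.Chars.startswith cs (cl ++ ['/']) = true
    · -- the prefix holds: show the first segment of cs is cl
      rw [hsw]
      have hp : cl ++ ['/'] <+: cs := (PySem.Chars.startswith_iff _ _).mp hsw
      have hcl : cl <+: cs := (List.prefix_append cl ['/']).trans hp
      set n := (PySem.Chars.find cs ['/']).toNat with hndef
      have hslash : ['/'] <+: cs.drop cl.length := by
        obtain ⟨t, ht⟩ := hp
        have hcs : cs = cl ++ ('/' :: t) := by rw [← ht]; simp
        refine ⟨t, ?_⟩
        rw [hcs, List.drop_left]; rfl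
      have hle : n ≤ cl.length := by
        by_contra hgt
        exact (hmin cl.length (by omega)) hslash
      have hge : cl.length ≤ n := by
        by_contra hgt
        have hlt : n < cl.length := by omega
        obtain ⟨t, ht⟩ := hpre
        have hdrop : List.drop n cs = '/' :: t := by rw [← ht]; rfl
        have hq : cs[n]? = some '/' := by
          have h2 := List.getElem?_drop (xs := cs) (i := n) (j := 0)
          rw [hdrop] at h2
          simpa using h2.symm
        obtain ⟨hh, hsn⟩ := List.getElem?_eq_some_iff.mp hq
        have hcl_n : cl[n] = '/' := by rw [hcl.getElem hlt]; exact hsn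
        exact hc (hcl_n ▸ List.getElem_mem hlt)
      have hlen : n = cl.length := by omega
      rw [hlen]
      have htk := (List.prefix_iff_eq_take.mp hcl).symm
      simp [htk]
    · -- the prefix fails: the first segment of cs cannot be cl
      have hsw' : PySem.Chars.startswith cs (cl ++ ['/']) = false := by simpa using hsw
      rw [hsw']
      by_contra hcontra
      have htake : cs.take (PySem.Chars.find cs ['/']).toNat = cl := by
        by_contra hne
        simp [hne] at hcontra
      obtain ⟨t, ht⟩ := hpre
      apply hsw
      rw [PySem.Chars.startswith_iff]
      refine ⟨t, ?_⟩
      calc cl ++ ['/'] ++ t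
          = cs.take (PySem.Chars.find cs ['/']).toNat ++ ('/' :: t) := by rw [htake]; simp
        _ = cs.take (PySem.Chars.find cs ['/']).toNat
              ++ cs.drop (PySem.Chars.find cs ['/']).toNat := by rw [← ht]; rfl
        _ = cs := List.take_append_drop _ cs
  · -- no '/' in cs: both sides are false
    have hm1 : PySem.Chars.find cs ['/'] = -1 := by
      have := PySem.Chars.neg_one_le_find cs ['/']
      omega
    have hninf : ¬ (['/'] <:+: cs) := (PySem.Chars.find_eq_neg_one_iff cs ['/']).mp hm1
    have hfalse : PySem.Chars.startswith cs (cl ++ ['/']) = false := by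
      by_contra h
      apply hninf
      have hp : cl ++ ['/'] <+: cs := (PySem.Chars.startswith_iff _ _).mp (by simpa using h)
      obtain ⟨t, ht⟩ := hp
      exact ⟨cl, t, ht⟩
    simp [hfalse, h0]

-- the same statement at String level, in the shape the ports use
lemma pv_sw_cat (m c : String) (hc : ('/' : Char) ∉ c.toList) :
    PySem.Str.startswith m (c ++ "/") =
      (decide (0 ≤ PySem.Str.find m "/") &&
       decide (PySem.Str.slice m none (some (PySem.Str.find m "/")) = c)) := by
  have hlist := pv_sw_slash_list m.toList c.toList hc
  have htl : ("/" : String).toList = ['/'] := rfl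
  rw [PySem.Str.startswith_eq, String.toList_append, htl, hlist, PySem.Str.find_eq, htl]
  by_cases h0 : 0 ≤ PySem.Chars.find m.toList ['/']
  · have hslice : (PySem.Str.slice m none (some (PySem.Chars.find m.toList ['/']))).toList
        = m.toList.take (PySem.Chars.find m.toList ['/']).toNat := by
      rw [PySem.Str.toList_slice, PySem.Chars.slice_eq_listSlice, PySem.List.slice_to _ h0]
    congr 1
    rw [decide_eq_decide]
    rw [← String.toList_inj, hslice]
  · simp [h0]

lemma pv_cond_image (m : String) :
    PySem.Str.startswith m "image/" =
      (decide (0 ≤ PySem.Str.find m "/") &&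
       decide (PySem.Str.slice m none (some (PySem.Str.find m "/")) = "image")) := by
  have h := pv_sw_cat m "image" (by decide)
  rwa [show ("image" ++ "/" : String) = "image/" from rfl] at h

lemma pv_cond_video (m : String) :
    PySem.Str.startswith m "video/" =
      (decide (0 ≤ PySem.Str.find m "/") &&
       decide (PySem.Str.slice m none (some (PySem.Str.find m "/")) = "video")) := by
  have h := pv_sw_cat m "video" (by decide)
  rwa [show ("video" ++ "/" : String) = "video/" from rfl] at h

lemma pv_cond_audio (m : String) :
    PySem.Str.startswith m "audio/" =
      (decide (0 ≤ PySem.Str.find m "/") &&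
       decide (PySem.Str.slice m none (some (PySem.Str.find m "/")) = "audio")) := by
  have h := pv_sw_cat m "audio" (by decide)
  rwa [show ("audio" ++ "/" : String) = "audio/" from rfl] at h

lemma pv_cond_application (m : String) :
    PySem.Str.startswith m "application/" =
      (decide (0 ≤ PySem.Str.find m "/") &&
       decide (PySem.Str.slice m none (some (PySem.Str.find m "/")) = "application")) := by
  have h := pv_sw_cat m "application" (by decide)
  rwa [show ("application" ++ "/" : String) = "application/" from rfl] at h

lemma pv_cond_text (m : String) :
    PySem.Str.startswith m "text/" =
      (decide (0 ≤ PySem.Str.find m "/") &&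
       decide (PySem.Str.slice m none (some (PySem.Str.find m "/")) = "text")) := by
  have h := pv_sw_cat m "text" (by decide)
  rwa [show ("text" ++ "/" : String) = "text/" from rfl] at h

-- A's prefix loop over the whole table equals a category lookup on the text before '/'
lemma pv_loop_eq (m : String) :
    pvPrefixLoop m pvTypeMapping.items =
      (if PySem.Str.find m "/" < 0 then "DigitalDocument"
       else pvCategoryMap.getD (PySem.Str.slice m none (some (PySem.Str.find m "/"))) "DigitalDocument") := by
  have hitems : pvTypeMapping.items = [
    ("image/jpeg", "ImageObject"),
    ("image/png", "ImageObject"),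
    ("image/gif", "ImageObject"),
    ("image/svg", "ImageObject"),
    ("image/webp", "ImageObject"),
    ("video/mp4", "VideoObject"),
    ("video/mpeg", "VideoObject"),
    ("video/quicktime", "VideoObject"),
    ("video/webm", "VideoObject"),
    ("audio/mpeg", "AudioObject"),
    ("audio/wav", "AudioObject"),
    ("audio/ogg", "AudioObject"),
    ("audio/mp4", "AudioObject"),
    ("application/pdf", "DigitalDocument"),
    ("application/msword", "DigitalDocument"),
    ("application/vnd.openxmlformats-officedocument.wordprocessingml.document", "DigitalDocument"),
    ("text/plain", "DigitalDocument"),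
    ("text/markdown", "DigitalDocument"),
    ("text/html", "WebPage"),
    ("application/json", "SoftwareSourceCode"),
    ("application/x-python", "SoftwareSourceCode"),
    ("text/x-python", "SoftwareSourceCode"),
    ("text/typescript", "SoftwareSourceCode")
  ] := by decide
  rw [hitems]
  simp only [pvPrefixLoop,
    (show ((PySem.List.pyGetD ((PySem.Str.split? "image/jpeg" "/").getD []) 0 "") ++ "/" : String) = "image/" from by decide),
    (show ((PySem.List.pyGetD ((PySem.Str.split? "image/png" "/").getD []) 0 "") ++ "/" : String) = "image/" from by decide),
    (show ((PySem.List.pyGetD ((PySem.Str.split? "image/gif" "/").getD []) 0 "") ++ "/" : String) = "image/" from by decide),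
    (show ((PySem.List.pyGetD ((PySem.Str.split? "image/svg" "/").getD []) 0 "") ++ "/" : String) = "image/" from by decide),
    (show ((PySem.List.pyGetD ((PySem.Str.split? "image/webp" "/").getD []) 0 "") ++ "/" : String) = "image/" from by decide),
    (show ((PySem.List.pyGetD ((PySem.Str.split? "video/mp4" "/").getD []) 0 "") ++ "/" : String) = "video/" from by decide),
    (show ((PySem.List.pyGetD ((PySem.Str.split? "video/mpeg" "/").getD []) 0 "") ++ "/" : String) = "video/" from by decide),
    (show ((PySem.List.pyGetD ((PySem.Str.split? "video/quicktime" "/").getD []) 0 "") ++ "/" : String) = "video/" from by decide),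
    (show ((PySem.List.pyGetD ((PySem.Str.split? "video/webm" "/").getD []) 0 "") ++ "/" : String) = "video/" from by decide),
    (show ((PySem.List.pyGetD ((PySem.Str.split? "audio/mpeg" "/").getD []) 0 "") ++ "/" : String) = "audio/" from by decide),
    (show ((PySem.List.pyGetD ((PySem.Str.split? "audio/wav" "/").getD []) 0 "") ++ "/" : String) = "audio/" from by decide),
    (show ((PySem.List.pyGetD ((PySem.Str.split? "audio/ogg" "/").getD []) 0 "") ++ "/" : String) = "audio/" from by decide),
    (show ((PySem.List.pyGetD ((PySem.Str.split? "audio/mp4" "/").getD []) 0 "") ++ "/" : String) = "audio/" from by decide),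
    (show ((PySem.List.pyGetD ((PySem.Str.split? "application/pdf" "/").getD []) 0 "") ++ "/" : String) = "application/" from by decide),
    (show ((PySem.List.pyGetD ((PySem.Str.split? "application/msword" "/").getD []) 0 "") ++ "/" : String) = "application/" from by decide),
    (show ((PySem.List.pyGetD ((PySem.Str.split? "application/vnd.openxmlformats-officedocument.wordprocessingml.document" "/").getD []) 0 "") ++ "/" : String) = "application/" from by decide),
    (show ((PySem.List.pyGetD ((PySem.Str.split? "text/plain" "/").getD []) 0 "") ++ "/" : String) = "text/" from by decide),
    (show ((PySem.List.pyGetD ((PySem.Str.split? "text/markdown" "/").getD []) 0 "") ++ "/" : String) = "text/" from by decide),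
    (show ((PySem.List.pyGetD ((PySem.Str.split? "text/html" "/").getD []) 0 "") ++ "/" : String) = "text/" from by decide),
    (show ((PySem.List.pyGetD ((PySem.Str.split? "application/json" "/").getD []) 0 "") ++ "/" : String) = "application/" from by decide),
    (show ((PySem.List.pyGetD ((PySem.Str.split? "application/x-python" "/").getD []) 0 "") ++ "/" : String) = "application/" from by decide),
    (show ((PySem.List.pyGetD ((PySem.Str.split? "text/x-python" "/").getD []) 0 "") ++ "/" : String) = "text/" from by decide),
    (show ((PySem.List.pyGetD ((PySem.Str.split? "text/typescript" "/").getD []) 0 "") ++ "/" : String) = "text/" from by decide),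
    pv_cond_image m, pv_cond_video m, pv_cond_audio m,
    pv_cond_application m, pv_cond_text m]
  have hcat : pvCategoryMap = PySem.Dict.mk
      [("image", "ImageObject"), ("video", "VideoObject"), ("audio", "AudioObject")] := by decide
  by_cases h0 : 0 ≤ PySem.Str.find m "/"
  · have hnlt : ¬ PySem.Str.find m "/" < 0 := by omega
    have h0' : 0 ≤ PySem.Chars.find m.toList ['/'] := by
      simpa [PySem.Str.find_eq] using h0
    have hnlt' : ¬ PySem.Chars.find m.toList ['/'] < 0 := by omega
    set p := PySem.Str.slice m none (some (PySem.Str.find m "/")) with hp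
    by_cases h1 : p = "image"
    · simp [h0', hnlt', h1, hcat, PySem.Dict.getD_eq_get?_getD, PySem.Dict.get?_mk_cons]
    · by_cases h2 : p = "video"
      · simp [h0', hnlt', h2, hcat, PySem.Dict.getD_eq_get?_getD, PySem.Dict.get?_mk_cons]
      · by_cases h3 : p = "audio"
        · simp [h0', hnlt', h3, hcat, PySem.Dict.getD_eq_get?_getD, PySem.Dict.get?_mk_cons]
        · by_cases h4 : p = "application"
          · simp [h0', hnlt', h4, hcat, PySem.Dict.getD_eq_get?_getD,
              PySem.Dict.get?]
          · by_cases h5 : p = "text"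
            · simp [h0', hnlt', h5, hcat, PySem.Dict.getD_eq_get?_getD,
                PySem.Dict.get?]
            · simp [h0', hnlt', h1, h2, h3, h4, h5, hcat, PySem.Dict.getD_eq_get?_getD,
                PySem.Dict.get?, Ne.symm h1, Ne.symm h2, Ne.symm h3]
  · have hlt : PySem.Str.find m "/" < 0 := by omega
    have h0' : ¬ 0 ≤ PySem.Chars.find m.toList ['/'] := by
      simp only [PySem.Str.find_eq] at h0
      simpa using h0
    have hlt' : PySem.Chars.find m.toList ['/'] < 0 := by omega
    simp [h0', hlt']

-- ===== VERDICT (by name: the statement is the Claim_ definition above) =====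
theorem get_schema_type_from_mime_spec : Claim_equal_get_schema_type_from_mime := by
  intro mime_type _
  unfold Spec_get_schema_type_from_mime
  cases mime_type with
  | none => rfl
  | some s =>
    unfold get_schema_type_from_mime get_schema_type_from_mime_alt
    by_cases hs : s = ""
    · simp [hs]
    · simp only [hs, if_false]
      by_cases hi : PySem.Str.find s "/" < 0
      · have hnone := pv_exact_none s hi
        have hcont : pvTypeMapping.contains s = false := by
          rw [PySem.Dict.contains_eq_isSome_get?, hnone]; rfl
        simp only [hcont, Bool.false_eq_true, if_false, hi, if_true]
        rw [pv_loop_eq (PySem.Str.lower s), pv_find_lower_str]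
        rw [if_pos hi]
      · have h0 : 0 ≤ PySem.Str.find s "/" := by omega
        have hexact := pv_exact_eq s h0
        simp only [hi, if_false]
        cases hget : (pvSubTable.getD (PySem.Str.slice s none (some (PySem.Str.find s "/")))
            (PySem.Dict.ofList [])).get?
            (PySem.Str.slice s (some (PySem.Str.find s "/" + 1)) none) with
        | some v =>
          rw [hget] at hexact
          have hcont : pvTypeMapping.contains s = true := by
            rw [PySem.Dict.contains_eq_isSome_get?, hexact]; rfl
          simp [hcont, hexact]
        | none =>
          rw [hget] at hexact
          have hcont : pvTypeMapping.contains s = false := by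
            rw [PySem.Dict.contains_eq_isSome_get?, hexact]; rfl
          simp only [hcont, Bool.false_eq_true, if_false]
          rw [pv_loop_eq (PySem.Str.lower s), pv_find_lower_str, pv_slice_lower_str s h0]
          rw [if_neg hi]
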